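-- pv_equiv track=rewrite | github.com/rupsaaa/my-python-programs | Functions/SpecialPalinList.py | check
-- ===== SOURCE A (Python) =====
-- def check(lt):
--    s1=[]
--    s2=[]
--    s3=[]
--    for word in lt:
--       if (word==word[::-1]):
--         s1.append(word)
--       elif (word[0]==word[-1]):
--          s2.append(word)
--       else:
--          s3.append(word)
--    return s1,s2,s3
-- ===== SOURCE B (Python) =====
-- def check(lt):
--     s1 = [w for w in lt if w == w[::-1]]
--     s2 = [w for w in lt if w != w[::-1] and w[0] == w[-1]]
--     s3 = [w for w in lt if w != w[::-1] and w[0] != w[-1]]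
--     return s1, s2, s3
-- ===== Notes on version B (the rewrite author's own statement) =====
-- stated objective: simpler
-- what changed: Replaces the single accumulator loop with three independent filtering comprehensions, one per bucket, with the palindrome test first so the empty string never indexes w[0].
import Mathlib
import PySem

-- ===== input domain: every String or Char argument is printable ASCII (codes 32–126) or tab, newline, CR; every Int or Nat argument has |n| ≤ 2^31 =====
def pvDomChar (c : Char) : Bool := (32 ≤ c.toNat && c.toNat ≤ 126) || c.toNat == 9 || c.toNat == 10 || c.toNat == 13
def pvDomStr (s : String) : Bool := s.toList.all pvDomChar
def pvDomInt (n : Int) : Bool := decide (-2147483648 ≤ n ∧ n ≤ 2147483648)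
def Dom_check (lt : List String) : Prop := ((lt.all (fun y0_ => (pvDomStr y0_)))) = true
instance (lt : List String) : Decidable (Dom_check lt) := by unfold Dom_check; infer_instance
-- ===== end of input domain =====

-- B replaces the single accumulator loop with three independent filtering passes (simpler decomposition).

-- ===== PORT A =====
-- word == word[::-1]  (s[::-1] via PySem.Str.slice?, always some for step -1)
def pvPal (w : String) : Bool := (PySem.Str.slice? w none none (-1)).getD "" == w
-- word[0] == word[-1]  (only evaluated when w is not a palindrome, hence nonempty; Option compare is exact there)
def pvEnds (w : String) : Bool := PySem.Str.pyGet? w 0 == PySem.Str.pyGet? w (-1)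

def check (lt : List String) : List String × List String × List String :=
  (lt.foldl (fun acc word =>
    if pvPal word then (acc.1 ++ [word], acc.2.1, acc.2.2)
    else if pvEnds word then (acc.1, acc.2.1 ++ [word], acc.2.2)
    else (acc.1, acc.2.1, acc.2.2 ++ [word])) ([], [], []))

-- ===== PORT B =====
def check_alt (lt : List String) : List String × List String × List String :=
  (lt.filter (fun w => pvPal w),
   lt.filter (fun w => !pvPal w && pvEnds w),
   lt.filter (fun w => !pvPal w && !pvEnds w))

-- ===== PRECONDITION & SPEC =====
def Spec_check (lt : List String) (out : List String × List String × List String) : Prop := out = check_alt lt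
instance (lt : List String) (out : List String × List String × List String) : Decidable (Spec_check lt out) := by unfold Spec_check; infer_instance

-- ===== CLAIM (what is proved, stated in full; the proofs are below) =====
def Claim_equal_check : Prop := ∀ (lt : List String), Dom_check lt → Spec_check lt (check lt)

-- ===== LEMMAS AND PROOFS =====
lemma check_foldl_eq (lt : List String) (s1 s2 s3 : List String) :
    lt.foldl (fun acc word =>
      if pvPal word then (acc.1 ++ [word], acc.2.1, acc.2.2)
      else if pvEnds word then (acc.1, acc.2.1 ++ [word], acc.2.2)
      else (acc.1, acc.2.1, acc.2.2 ++ [word])) (s1, s2, s3) =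
    (s1 ++ lt.filter (fun w => pvPal w),
     s2 ++ lt.filter (fun w => !pvPal w && pvEnds w),
     s3 ++ lt.filter (fun w => !pvPal w && !pvEnds w)) := by
  induction lt generalizing s1 s2 s3 with
  | nil => simp
  | cons w ws ih =>
    by_cases hp : pvPal w <;> by_cases he : pvEnds w <;>
      simp [List.foldl_cons, hp, he, ih]

-- ===== VERDICT (by name: the statement is the Claim_ definition above) =====
theorem check_spec : Claim_equal_check := by
  intro lt _
  show check lt = check_alt lt
  simp [check, check_alt, check_foldl_eq]
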